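-- pv_equiv track=rewrite | github.com/DeadOwwl/uni | 4 sem/recurrency py + java/necklace.py | pow_division
-- ===== SOURCE A (Python) =====
-- def pow_division(n_pd):
--     result = 1
--     degree = module - 2
--     while degree != 0:
--         if degree & 1:
--             result = (result * n_pd) % module
--         n_pd = (n_pd * n_pd) % module
--         degree >>= 1
--     return result
--
-- module = 1000000007
-- ===== SOURCE B (Python) =====
-- def pow_division(n_pd):
--     def fast_pow(base, e):
--         if e == 0:
--             return 1
--         half = fast_pow(base, e // 2)
--         sq = (half * half) % module
--         if e & 1:
--             return (sq * base) % module
--         return sq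
--     return fast_pow(n_pd, module - 2)
--
-- module = 1000000007
-- ===== Notes on version B (the rewrite author's own statement) =====
-- stated objective: alternative
-- what changed: Replaced the LSB-first iterative square-and-multiply loop (mutating result/base/degree) by a recursive divide-and-conquer fast power that recurses on e//2 and squares the recursive result (MSB-first), called with exponent module minus two.
import Mathlib
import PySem

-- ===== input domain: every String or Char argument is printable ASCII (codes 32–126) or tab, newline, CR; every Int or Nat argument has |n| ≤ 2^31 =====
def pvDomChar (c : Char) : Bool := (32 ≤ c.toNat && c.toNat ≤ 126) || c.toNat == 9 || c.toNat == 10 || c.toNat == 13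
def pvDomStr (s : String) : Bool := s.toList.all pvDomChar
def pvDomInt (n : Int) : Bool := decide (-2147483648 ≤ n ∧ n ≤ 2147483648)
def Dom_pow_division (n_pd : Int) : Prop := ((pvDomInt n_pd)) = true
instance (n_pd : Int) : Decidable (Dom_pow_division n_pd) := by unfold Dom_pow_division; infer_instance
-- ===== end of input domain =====

-- B replaces A's LSB-first iterative square-and-multiply loop by an MSB-first
-- recursive divide-and-conquer fast power (recursion on e/2); same cost, different decomposition.

def pvModule : Int := 1000000007

-- ===== PORT A =====
-- A's while-loop over (result, n_pd, degree); degree starts at the nonnegative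
-- literal module minus two, so it is carried as a Nat ('degree & 1' = degree % 2,
-- 'degree >>= 1' = degree / 2, exact on nonnegative values).
def powLoopA (result n_pd : Int) (degree : Nat) : Int :=
  if degree = 0 then result
  else
    powLoopA (if degree % 2 = 1 then PySem.Int.mod (result * n_pd) pvModule else result)
      (PySem.Int.mod (n_pd * n_pd) pvModule) (degree / 2)
  decreasing_by exact Nat.div_lt_self (Nat.pos_of_ne_zero (by assumption)) (by omega)

def pow_division (n_pd : Int) : Int := powLoopA 1 n_pd 1000000005

-- ===== PORT B =====
def fastPowB (base : Int) (e : Nat) : Int :=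
  if e = 0 then 1
  else
    let half := fastPowB base (e / 2)
    let sq := PySem.Int.mod (half * half) pvModule
    if e % 2 = 1 then PySem.Int.mod (sq * base) pvModule else sq
  decreasing_by exact Nat.div_lt_self (Nat.pos_of_ne_zero (by assumption)) (by omega)

def pow_division_alt (n_pd : Int) : Int := fastPowB n_pd 1000000005

-- ===== PRECONDITION & SPEC =====
def Spec_pow_division (n_pd : Int) (out : Int) : Prop := out = pow_division_alt n_pd
instance (n_pd : Int) (out : Int) : Decidable (Spec_pow_division n_pd out) := by unfold Spec_pow_division; infer_instance

-- ===== CLAIM (what is proved, stated in full; the proofs are below) =====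
def Claim_equal_pow_division : Prop := ∀ (n_pd : Int), Dom_pow_division n_pd → Spec_pow_division n_pd (pow_division n_pd)

-- ===== LEMMAS AND PROOFS =====

theorem pvPow_emod (a : Int) (n : Nat) (m : Int) : (a % m) ^ n % m = a ^ n % m := by
  induction n with
  | zero => simp
  | succ k ih => rw [pow_succ, pow_succ, Int.mul_emod, ih, Int.emod_emod_of_dvd _ dvd_rfl,
      ← Int.mul_emod]

theorem pvMod_eq (a : Int) : PySem.Int.mod a pvModule = a % pvModule :=
  PySem.Int.mod_eq_emod_of_pos (by norm_num [pvModule])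

-- A's loop computes (result * base^degree) % pvModule, for degree ≥ 1.
theorem powLoopA_eq (degree : Nat) (result base : Int) (h : degree ≠ 0) :
    powLoopA result base degree = (result * base ^ degree) % pvModule := by
  induction degree using Nat.strong_induction_on generalizing result base with
  | _ d ih =>
    rw [powLoopA]
    simp only [h, if_false]
    by_cases hd1 : d / 2 = 0
    · have hd : d = 1 := by omega
      subst hd
      rw [powLoopA]
      simp [pvMod_eq]
    · rw [ih (d / 2) (Nat.div_lt_self (Nat.pos_of_ne_zero h) (by omega)) _ _ hd1]
      have h2 : d % 2 = 0 ∨ d % 2 = 1 := Nat.mod_two_eq_zero_or_one d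
      have hd2 : d = 2 * (d / 2) + d % 2 := (Nat.div_add_mod d 2).symm.trans (by ring)
      rcases h2 with h2 | h2
      · simp only [h2, (by norm_num : (0:Nat) ≠ 1), if_false, pvMod_eq]
        rw [Int.mul_emod, pvPow_emod, ← Int.mul_emod]
        congr 1
        rw [← pow_two, ← pow_mul, (by omega : 2 * (d / 2) = d)]
      · simp only [h2, if_true, pvMod_eq]
        rw [Int.mul_emod, pvPow_emod, Int.emod_emod_of_dvd _ dvd_rfl, ← Int.mul_emod,
            mul_assoc]
        congr 1
        rw [← pow_two, ← pow_mul, ← pow_succ', (by omega : 2 * (d / 2) + 1 = d)]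

-- B's recursion computes base^e % pvModule (for every e, since 1 % pvModule = 1).
theorem fastPowB_eq (e : Nat) (base : Int) : fastPowB base e = base ^ e % pvModule := by
  induction e using Nat.strong_induction_on generalizing base with
  | _ e ih =>
    rw [fastPowB]
    by_cases he : e = 0
    · simp [he]; norm_num [pvModule]
    · simp only [he, if_false]
      rw [ih (e / 2) (Nat.div_lt_self (Nat.pos_of_ne_zero he) (by omega))]
      simp only [pvMod_eq]
      have h2 : e % 2 = 0 ∨ e % 2 = 1 := Nat.mod_two_eq_zero_or_one e
      rcases h2 with h2 | h2
      · simp only [h2, (by norm_num : (0:Nat) ≠ 1), if_false]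
        rw [← Int.mul_emod, ← pow_add]
        congr 2
        omega
      · simp only [h2, if_true]
        rw [← Int.mul_emod, ← pow_add, Int.mul_emod, Int.emod_emod_of_dvd _ dvd_rfl,
            ← Int.mul_emod, ← pow_succ]
        congr 2
        omega

-- ===== VERDICT (by name: the statement is the Claim_ definition above) =====
theorem pow_division_spec : Claim_equal_pow_division := by
  intro n _
  unfold Spec_pow_division pow_division pow_division_alt
  rw [powLoopA_eq _ _ _ (by norm_num), fastPowB_eq, one_mul]
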